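-- pv_equiv track=rewrite | github.com/Divyateja04/gfg_sums | Difficulty: Easy/Tywin's War Strategy/tywins-war-strategy.py | minSoldiers
-- ===== SOURCE A (Python) =====
-- import math
--
-- def minSoldiers(arr, k):
--     n = len(arr)
--     for i in range(n):
--         arr[i] = 0 if arr[i]%k == 0 else k-arr[i]%k
--     arr.sort()
--     troops = int(math.ceil(n/2))
--     ans = 0
--     for i in range(troops):
--         ans += arr[i]
--     return ans
-- ===== SOURCE B (Python) =====
-- def minSoldiers(arr, k):
--     # Iterative quickselect with a "ninther" pivot (median of three medians of three):
--     # partitions the top-up values and accumulates the sum of the smallest ceil(n/2),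
--     # never sorting. (Does not mutate arr; equivalence to A is about the return value only.)
--     xs = [(-x) % k for x in arr]
--     m = (len(arr) + 1) // 2
--     acc = 0
--     while True:
--         if m <= 0:
--             return acc
--         if m >= len(xs):
--             return acc + sum(xs)
--         p = _ninther(xs)
--         less = [x for x in xs if x < p]
--         eqs = [x for x in xs if x == p]
--         if m <= len(less):
--             xs = less
--             continue
--         if m <= len(less) + len(eqs):
--             return acc + sum(less) + (m - len(less)) * p
--         acc += sum(less) + sum(eqs)
--         m -= len(less) + len(eqs)
--         xs = [x for x in xs if x > p]
--
--
-- def _med3(a, b, c):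
--     return max(min(a, b), min(max(a, b), c))
--
--
-- def _ninther(xs):
--     n = len(xs)
--     return _med3(_med3(xs[0], xs[n // 8], xs[n // 4]),
--                  _med3(xs[3 * n // 8], xs[n // 2], xs[5 * n // 8]),
--                  _med3(xs[3 * n // 4], xs[7 * n // 8], xs[n - 1]))
-- ===== Notes on version B (the rewrite author's own statement) =====
-- stated objective: alternative
-- what changed: B replaces A's full sort + prefix loop with an iterative quickselect: it repeatedly partitions the top-up values ((-x) % k) around a ninther pivot and accumulates the sum of the smallest ceil(n/2) of them, never sorting.
import Mathlib
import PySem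

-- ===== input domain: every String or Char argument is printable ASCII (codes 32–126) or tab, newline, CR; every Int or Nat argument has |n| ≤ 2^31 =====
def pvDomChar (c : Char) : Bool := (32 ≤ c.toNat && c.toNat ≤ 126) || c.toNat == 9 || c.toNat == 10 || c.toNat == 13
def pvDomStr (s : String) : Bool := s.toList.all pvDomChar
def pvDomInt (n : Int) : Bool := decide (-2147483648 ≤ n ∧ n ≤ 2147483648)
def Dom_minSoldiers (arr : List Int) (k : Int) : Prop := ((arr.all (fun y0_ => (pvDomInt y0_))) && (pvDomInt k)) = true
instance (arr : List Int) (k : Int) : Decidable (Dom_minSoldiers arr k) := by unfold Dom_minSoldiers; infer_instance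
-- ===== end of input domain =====

-- B sums the smallest ceil(n/2) top-up values by iterative quickselect partitioning
-- around a ninther pivot (no sort), instead of A's full ascending sort and prefix loop.
-- A mutates arr in place (rewrites and sorts it); B does not: equivalence is about the return value.

-- ===== PORT A =====
def minSoldiers (arr : List Int) (k : Int) : Int :=
  let n : Int := arr.length
  -- for i in range(n): arr[i] = 0 if arr[i]%k == 0 else k - arr[i]%k  (in-place elementwise update)
  let arr1 := arr.map (fun x => if PySem.Int.mod x k = 0 then 0 else k - PySem.Int.mod x k)
  -- arr.sort()
  let arr2 := PySem.List.sorted arr1 (fun x => x) false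
  -- troops = int(math.ceil(n/2)); exact for 0 ≤ n: ceil(n/2) = (n+1)//2
  let troops := PySem.Int.floordiv (n + 1) 2
  (PySem.List.pyRange 0 troops 1).foldl (fun ans i => ans + PySem.List.pyGetD arr2 i 0) 0

-- ===== PORT B =====
-- med3(a,b,c) = max(min(a,b), min(max(a,b),c)), the median of three
def med3 (a b c : Int) : Int := max (min a b) (min (max a b) c)

-- the ninther pivot of Source B: median of three medians of three sampled positions
def ninther (xs : List Int) : Int :=
  let n := xs.length
  med3 (med3 (xs.getD 0 0) (xs.getD (n / 8) 0) (xs.getD (n / 4) 0))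
       (med3 (xs.getD (3 * n / 8) 0) (xs.getD (n / 2) 0) (xs.getD (5 * n / 8) 0))
       (med3 (xs.getD (3 * n / 4) 0) (xs.getD (7 * n / 8) 0) (xs.getD (n - 1) 0))

-- the while-loop of Source B, state (xs, m, acc): each iteration either returns or strictly
-- shrinks xs, so fuel = initial length makes the recursion structural (fuel is never exhausted
-- while the loop would continue)
def sumSmallestGo : Nat → List Int → Int → Int → Int
  | 0, _, _, acc => acc
  | fuel + 1, xs, m, acc =>
    if m ≤ 0 then acc
    else if (xs.length : Int) ≤ m then acc + xs.sum
    else match xs with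
      | [] => acc   -- unreachable: here 0 < m < xs.length
      | hd :: tl =>
        let p := ninther (hd :: tl)   -- all nine sampled indices are in range here
        let less := (hd :: tl).filter (fun x => x < p)
        let eqs := (hd :: tl).filter (fun x => x = p)
        if m ≤ (less.length : Int) then sumSmallestGo fuel less m acc
        else if m ≤ (less.length : Int) + (eqs.length : Int) then
          acc + less.sum + (m - less.length) * p
        else sumSmallestGo fuel ((hd :: tl).filter (fun x => p < x)) (m - less.length - eqs.length)
          (acc + less.sum + eqs.sum)

def minSoldiers_alt (arr : List Int) (k : Int) : Int :=
  let xs := arr.map (fun x => PySem.Int.mod (-x) k)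
  sumSmallestGo xs.length xs (PySem.Int.floordiv ((arr.length : Int) + 1) 2) 0

-- ===== PRECONDITION & SPEC =====
-- Pre_ excludes exactly the inputs where Python A raises ZeroDivisionError: k = 0 with a nonempty arr.
def Pre_minSoldiers (arr : List Int) (k : Int) : Prop := arr = [] ∨ k ≠ 0
instance (arr : List Int) (k : Int) : Decidable (Pre_minSoldiers arr k) := by unfold Pre_minSoldiers; infer_instance
def pvWitness_minSoldiers : List Int × Int := ([4, 1, 7], 3)

def Spec_minSoldiers (arr : List Int) (k : Int) (out : Int) : Prop := out = minSoldiers_alt arr k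
instance (arr : List Int) (k : Int) (out : Int) : Decidable (Spec_minSoldiers arr k out) := by unfold Spec_minSoldiers; infer_instance

-- ===== CLAIM (what is proved, stated in full; the proofs are below) =====
def Claim_equal_minSoldiers : Prop := ∀ (arr : List Int) (k : Int), Dom_minSoldiers arr k → Pre_minSoldiers arr k → Spec_minSoldiers arr k (minSoldiers arr k)

-- ===== LEMMAS AND PROOFS =====

-- The two per-element top-up formulas agree for k ≠ 0.
lemma top_eq (x k : Int) (hk : k ≠ 0) :
    (if PySem.Int.mod x k = 0 then 0 else k - PySem.Int.mod x k) = PySem.Int.mod (-x) k := by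
  by_cases h : PySem.Int.mod x k = 0
  · have hd : k ∣ x := (PySem.Int.mod_eq_zero_iff_dvd x k).mp h
    have : PySem.Int.mod (-x) k = 0 := (PySem.Int.mod_eq_zero_iff_dvd (-x) k).mpr (dvd_neg.mpr hd)
    simp [h, this]
  · have hd : ¬ k ∣ x := fun hc => h ((PySem.Int.mod_eq_zero_iff_dvd x k).mpr hc)
    have hb : PySem.Int.mod (-x) k ≠ 0 := fun hc =>
      hd (dvd_neg.mp ((PySem.Int.mod_eq_zero_iff_dvd (-x) k).mp hc))
    have e1 := PySem.Int.floordiv_mul_add_mod x k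
    have e2 := PySem.Int.floordiv_mul_add_mod (-x) k
    obtain ⟨c, hc⟩ : k ∣ (PySem.Int.mod x k + PySem.Int.mod (-x) k) :=
      ⟨-(PySem.Int.floordiv x k + PySem.Int.floordiv (-x) k), by linear_combination e1 + e2⟩
    simp only [if_neg h]
    rcases lt_or_gt_of_ne hk with hneg | hpos
    · obtain ⟨b1l, b1r⟩ := PySem.Int.mod_neg_bounds x (b := k) hneg
      obtain ⟨b2l, b2r⟩ := PySem.Int.mod_neg_bounds (-x) (b := k) hneg
      have ha0 : PySem.Int.mod x k < 0 := lt_of_le_of_ne b1r h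
      have hb0 : PySem.Int.mod (-x) k < 0 := lt_of_le_of_ne b2r hb
      have hc1 : 0 < c := by by_contra hcon; push Not at hcon; nlinarith
      have hc2 : c < 2 := by by_contra hcon; push Not at hcon; nlinarith
      have : c = 1 := by omega
      subst this; linarith [hc]
    · have a1 := PySem.Int.mod_nonneg x (b := k) hpos
      have a2 := PySem.Int.mod_lt x (b := k) hpos
      have c1 := PySem.Int.mod_nonneg (-x) (b := k) hpos
      have c2 := PySem.Int.mod_lt (-x) (b := k) hpos
      have ha0 : 0 < PySem.Int.mod x k := lt_of_le_of_ne a1 (Ne.symm h)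
      have hb0 : 0 < PySem.Int.mod (-x) k := lt_of_le_of_ne c1 (Ne.symm hb)
      have hc1 : 0 < c := by by_contra hcon; push Not at hcon; nlinarith
      have hc2 : c < 2 := by by_contra hcon; push Not at hcon; nlinarith
      have : c = 1 := by omega
      subst this; linarith [hc]

-- Prefix of a list as a range-indexed map.
lemma range_map_getD_eq_take (s : List Int) (m : Nat) (h : m ≤ s.length) :
    (List.range m).map (fun j => s.getD j 0) = s.take m := by
  apply List.ext_getElem
  · simp [h]
  · intro i h1 h2
    simp at h1
    simp [List.getD_eq_getElem?_getD, List.getElem?_eq_getElem (by omega : i < s.length)]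

-- The three pivot filters are a permutation of the list.
lemma filter_tri_perm (xs : List Int) (p : Int) :
    (xs.filter (fun x => x < p) ++ (xs.filter (fun x => x = p)
      ++ xs.filter (fun x => p < x))).Perm xs := by
  rw [List.perm_iff_count]
  intro a
  simp only [List.count_append]
  have c1 : ¬ a < p → List.count a (xs.filter (fun x => x < p)) = 0 := fun h =>
    List.count_eq_zero.mpr (fun hc => h (by simpa using (List.mem_filter.mp hc).2))
  have c2 : a ≠ p → List.count a (xs.filter (fun x => x = p)) = 0 := fun h =>
    List.count_eq_zero.mpr (fun hc => h (by simpa using (List.mem_filter.mp hc).2))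
  have c3 : ¬ p < a → List.count a (xs.filter (fun x => p < x)) = 0 := fun h =>
    List.count_eq_zero.mpr (fun hc => h (by simpa using (List.mem_filter.mp hc).2))
  rcases lt_trichotomy a p with h | h | h
  · rw [c2 (by omega), c3 (by omega), List.count_filter (by simp [h])]
    omega
  · rw [c1 (by omega), c3 (by omega), List.count_filter (by simp [h])]
    omega
  · rw [c1 (by omega), c2 (by omega), List.count_filter (by simp [h])]
    omega

-- The equal-to-pivot filter is a replicate of the pivot.
lemma filter_eq_replicate (xs : List Int) (p : Int) :
    xs.filter (fun x => x = p)
      = List.replicate (xs.filter (fun x => x = p)).length p := by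
  rw [List.eq_replicate_iff]
  exact ⟨rfl, fun b hb => by simpa using (List.mem_filter.mp hb).2⟩

-- Three-way partition around a pivot: the ascending sort decomposes as
-- sorted(less) ++ eqs ++ sorted(greater).
lemma sorted_split (xs : List Int) (p : Int) :
    PySem.List.sorted xs (fun x => x) false =
      PySem.List.sorted (xs.filter (fun x => x < p)) (fun x => x) false
        ++ xs.filter (fun x => x = p)
        ++ PySem.List.sorted (xs.filter (fun x => p < x)) (fun x => x) false := by
  rw [List.append_assoc]
  have mless : ∀ a ∈ PySem.List.sorted (xs.filter (fun x => x < p)) (fun x => x) false, a < p := by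
    intro a ha
    have := (PySem.List.sorted_perm (xs.filter (fun x => x < p)) (fun x => x) false).mem_iff.mp ha
    simpa using (List.mem_filter.mp this).2
  have mgt : ∀ a ∈ PySem.List.sorted (xs.filter (fun x => p < x)) (fun x => x) false, p < a := by
    intro a ha
    have := (PySem.List.sorted_perm (xs.filter (fun x => p < x)) (fun x => x) false).mem_iff.mp ha
    simpa using (List.mem_filter.mp this).2
  have meq : ∀ a ∈ xs.filter (fun x => x = p), a = p := by
    intro a ha; simpa using (List.mem_filter.mp ha).2
  apply List.Perm.eq_of_pairwise (le := fun a b : Int => a ≤ b)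
  · exact fun a b _ _ h1 h2 => le_antisymm h1 h2
  · simpa using PySem.List.sorted_pairwise xs (fun x => x)
  · rw [List.pairwise_append]
    refine ⟨by simpa using PySem.List.sorted_pairwise (xs.filter (fun x => x < p)) (fun x => x),
      ?_, ?_⟩
    · rw [List.pairwise_append]
      refine ⟨?_, by simpa using PySem.List.sorted_pairwise (xs.filter (fun x => p < x)) (fun x => x),
        fun a ha b hb => ?_⟩
      · rw [filter_eq_replicate xs p]
        exact (List.pairwise_replicate).mpr (Or.inr le_rfl)
      · have := meq a ha; have := mgt b hb; omega
    · intro a ha b hb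
      rcases List.mem_append.mp hb with hb | hb
      · have := mless a ha; have := meq b hb; omega
      · have := mless a ha; have := mgt b hb; omega
  · exact (PySem.List.sorted_perm xs (fun x => x) false).trans
      ((filter_tri_perm xs p).symm.trans
        (((PySem.List.sorted_perm (xs.filter (fun x => x < p)) (fun x => x) false).symm).append
          ((List.Perm.refl (xs.filter (fun x => x = p))).append
            (PySem.List.sorted_perm (xs.filter (fun x => p < x)) (fun x => x) false).symm)))

-- The quickselect loop computes acc + sum of the first m elements of the ascending sort.
-- the median of three is one of the three
lemma med3_cases (a b c : Int) : med3 a b c = a ∨ med3 a b c = b ∨ med3 a b c = c := by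
  unfold med3
  simp only [max_def, min_def]
  split_ifs <;> tauto

lemma med3_mem_list {l : List Int} {a b c : Int} (ha : a ∈ l) (hb : b ∈ l) (hc : c ∈ l) :
    med3 a b c ∈ l := by
  rcases med3_cases a b c with h | h | h <;> rw [h] <;> assumption

lemma ninther_mem (hd : Int) (rest : List Int) : ninther (hd :: rest) ∈ hd :: rest := by
  have g : ∀ i, i < (hd :: rest).length → (hd :: rest).getD i 0 ∈ hd :: rest := fun i hi => by
    rw [List.getD_eq_getElem _ _ hi]
    exact List.getElem_mem _
  unfold ninther
  have hl : (hd :: rest).length = rest.length + 1 := by simp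
  refine med3_mem_list (med3_mem_list (g _ ?_) (g _ ?_) (g _ ?_))
    (med3_mem_list (g _ ?_) (g _ ?_) (g _ ?_))
    (med3_mem_list (g _ ?_) (g _ ?_) (g _ ?_)) <;> omega

-- auxiliary: induction on the fuel
lemma go_correct_aux : ∀ (n : Nat) (xs : List Int), xs.length ≤ n → ∀ (m acc : Int),
    sumSmallestGo n xs m acc
      = acc + ((PySem.List.sorted xs (fun x => x) false).take m.toNat).sum := by
  intro n
  induction n with
  | zero =>
    intro xs hlen m acc
    have : xs = [] := List.length_eq_zero_iff.mp (by omega)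
    subst this
    simp [sumSmallestGo, PySem.List.sorted]
  | succ n IH =>
    intro xs hlen m acc
    simp only [sumSmallestGo]
    by_cases h0 : m ≤ 0
    · have ht : m.toNat = 0 := by omega
      simp [h0, ht]
    · by_cases h1 : (xs.length : Int) ≤ m
      · have hp := PySem.List.sorted_perm xs (fun x => x) false
        rw [if_neg h0, if_pos h1, List.take_of_length_le (by rw [hp.length_eq]; omega), hp.sum_eq]
      · rw [if_neg h0, if_neg h1]
        cases xs with
        | nil => simp at h1; omega
        | cons hd rest =>
          simp only []
          set p := ninther (hd :: rest) with hpdef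
          set less := (hd :: rest).filter (fun x => x < p) with hless
          set eqs := (hd :: rest).filter (fun x => x = p) with heqs
          set gtr := (hd :: rest).filter (fun x => p < x) with hgtr
          have hpmem : p ∈ hd :: rest := by rw [hpdef]; exact ninther_mem hd rest
          have hlen_less : less.length < (hd :: rest).length := by
            rw [hless]
            exact List.length_filter_lt_length_iff_exists.mpr ⟨p, hpmem, by simp⟩
          have hlen_gtr : gtr.length < (hd :: rest).length := by
            rw [hgtr]
            exact List.length_filter_lt_length_iff_exists.mpr ⟨p, hpmem, by simp⟩
          have hsplit := sorted_split (hd :: rest) p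
          rw [← hless, ← heqs, ← hgtr] at hsplit
          have hpl := PySem.List.sorted_perm less (fun x => x) false
          have hpg := PySem.List.sorted_perm gtr (fun x => x) false
          have hAl : (PySem.List.sorted less (fun x => x) false).length = less.length := hpl.length_eq
          have hCl : (PySem.List.sorted gtr (fun x => x) false).length = gtr.length := hpg.length_eq
          rw [hsplit, List.take_append, List.take_append, List.sum_append, List.sum_append]
          by_cases h2 : m ≤ (less.length : Int)
          · rw [if_pos h2]
            have h3 : m.toNat ≤ less.length := by omega
            have z1 : m.toNat - (PySem.List.sorted less (fun x => x) false).length = 0 := by omega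
            have z2 : m.toNat -
                ((PySem.List.sorted less (fun x => x) false) ++ eqs).length = 0 := by
              simp [hAl]; omega
            rw [z1, z2]
            simp only [List.take_zero, List.sum_nil, add_zero]
            rw [IH less (by simp at hlen hlen_less; omega) m acc]
          · rw [if_neg h2]
            have hA_full : (PySem.List.sorted less (fun x => x) false).take m.toNat
                = PySem.List.sorted less (fun x => x) false :=
              List.take_of_length_le (by omega)
            have hAsum : (PySem.List.sorted less (fun x => x) false).sum = less.sum := hpl.sum_eq
            by_cases h4 : m ≤ (less.length : Int) + (eqs.length : Int)
            · rw [if_pos h4]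
              have z3 : m.toNat -
                  ((PySem.List.sorted less (fun x => x) false) ++ eqs).length = 0 := by
                simp [hAl]; omega
              rw [z3, hA_full, hAsum, hAl]
              simp only [List.take_zero, List.sum_nil, add_zero]
              have hrep : eqs = List.replicate eqs.length p := by
                simpa [← heqs] using filter_eq_replicate (hd :: rest) p
              rw [hrep, List.take_replicate,
                show min (m.toNat - less.length) eqs.length = m.toNat - less.length by omega,
                List.sum_replicate, nsmul_eq_mul,
                show ((m.toNat - less.length : Nat) : Int) = m - less.length by omega]
              ring
            · rw [if_neg h4]
              have z4 : m.toNat - ((PySem.List.sorted less (fun x => x) false) ++ eqs).length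
                  = (m - less.length - eqs.length).toNat := by
                simp [hAl]; omega
              have hB_full : eqs.take (m.toNat -
                  (PySem.List.sorted less (fun x => x) false).length) = eqs := by
                apply List.take_of_length_le; omega
              rw [z4, hA_full, hAsum, hB_full]
              rw [IH gtr (by simp at hlen hlen_gtr; omega)
                (m - less.length - eqs.length) (acc + less.sum + eqs.sum)]
              ring

lemma go_correct (xs : List Int) (m acc : Int) :
    sumSmallestGo xs.length xs m acc
      = acc + ((PySem.List.sorted xs (fun x => x) false).take m.toNat).sum := by
  exact go_correct_aux xs.length xs le_rfl m acc

theorem minSoldiers_spec : Claim_equal_minSoldiers := by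
  intro arr k _ hpre
  unfold Spec_minSoldiers minSoldiers minSoldiers_alt
  rcases hpre with rfl | hk
  · rw [go_correct]
    norm_num [PySem.List.sorted, PySem.List.pyRange, PySem.Int.floordiv]
    simp [show Int.fdiv 1 2 = 0 from rfl]
  · simp only []
    have htops : arr.map (fun x => if PySem.Int.mod x k = 0 then 0 else k - PySem.Int.mod x k)
        = arr.map (fun x => PySem.Int.mod (-x) k) :=
      List.map_congr_left (fun x _ => top_eq x k hk)
    rw [htops, go_correct]
    set t := arr.map (fun x => PySem.Int.mod (-x) k) with ht
    set s := PySem.List.sorted t (fun x => x) false with hs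
    have hlen : t.length = arr.length := by simp [ht]
    have hslen : s.length = arr.length := by
      rw [hs, (PySem.List.sorted_perm t (fun x => x) false).length_eq, hlen]
    have htr : PySem.Int.floordiv ((arr.length : Int) + 1) 2 = (((arr.length + 1) / 2 : Nat) : Int) := by
      rw [show ((arr.length : Int) + 1) = (((arr.length + 1 : Nat)) : Int) by push_cast; ring]
      exact_mod_cast PySem.Int.floordiv_natCast (arr.length + 1) 2
    set m : Nat := (arr.length + 1) / 2 with hm
    have hmle : m ≤ s.length := by rw [hslen]; omega
    -- A's loop = sum of the first m elements of s
    have hA : (PySem.List.pyRange 0 (PySem.Int.floordiv ((arr.length : Int) + 1) 2) 1).foldl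
        (fun ans i => ans + PySem.List.pyGetD s i 0) 0 = (s.take m).sum := by
      rw [htr, show ((((arr.length + 1) / 2 : Nat)) : Int) = ((m : Nat) : Int) by rw [hm],
        PySem.List.pyRange_one 0 (m : Int)]
      simp only [zero_add, sub_zero, Int.toNat_natCast]
      rw [List.foldl_map]
      rw [PySem.List.foldl_add (List.range m) (fun j : Nat => PySem.List.pyGetD s (j : Int) 0) 0]
      have : (List.range m).map (fun j : Nat => PySem.List.pyGetD s (j : Int) 0)
          = (List.range m).map (fun j => s.getD j 0) := by
        apply List.map_congr_left; intro j _; simp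
      rw [this, range_map_getD_eq_take s m hmle]; ring
    rw [hA, htr]
    simp
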